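-- pv_equiv track=rewrite | github.com/Master-PLC/NeuralODE | Glow_Generative_Flow_with_Invertible_1plus1_Convolutions/utils/common.py | calc_z_shapes
-- ===== SOURCE A (Python) =====
-- def calc_z_shapes(num_channels, input_size, num_flow, num_block):
--     z_shapes = []
--
--     for _ in range(num_block - 1):
--         input_size //= 2
--         num_channels *= 2
--         z_shapes.append((num_channels, input_size, input_size))
--
--     input_size //= 2
--     z_shapes.append((num_channels * 4, input_size, input_size))
--     return z_shapes
-- ===== SOURCE B (Python) =====
-- def calc_z_shapes(num_channels, input_size, num_flow, num_block):
--     n = max(0, num_block - 1)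
--     shapes = [(num_channels << (i + 1),
--                input_size >> (i + 1),
--                input_size >> (i + 1)) for i in range(n)]
--     shapes.append(((num_channels << n) * 4,
--                    input_size >> (n + 1),
--                    input_size >> (n + 1)))
--     return shapes
-- ===== Notes on version B (the rewrite author's own statement) =====
-- stated objective: alternative
-- what changed: Replaces the stateful loop threading halved sizes and doubled channels with a closed-form per-index computation (channels num_channels*2^(i+1), size input_size // 2^(i+1)), using that repeated floor-halving equals one floor-division by a power of two.
import Mathlib
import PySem

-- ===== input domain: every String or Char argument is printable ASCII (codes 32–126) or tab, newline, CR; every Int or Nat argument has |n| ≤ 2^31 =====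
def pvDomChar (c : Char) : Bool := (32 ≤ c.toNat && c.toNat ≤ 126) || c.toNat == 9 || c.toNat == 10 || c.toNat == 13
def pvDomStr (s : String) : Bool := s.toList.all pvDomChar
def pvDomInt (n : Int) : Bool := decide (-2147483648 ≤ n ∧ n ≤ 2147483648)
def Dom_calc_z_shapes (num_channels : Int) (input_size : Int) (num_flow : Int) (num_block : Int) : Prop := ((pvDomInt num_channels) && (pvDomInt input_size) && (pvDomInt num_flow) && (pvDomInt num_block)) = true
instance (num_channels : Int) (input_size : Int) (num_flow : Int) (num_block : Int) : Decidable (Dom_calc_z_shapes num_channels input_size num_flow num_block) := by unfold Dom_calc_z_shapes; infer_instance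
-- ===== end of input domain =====

-- B replaces A's stateful loop (halving the size and doubling the channels each step)
-- by a closed-form per-index computation; same cost, different decomposition.

-- ===== PORT A =====
-- literal transliteration of A: the loop threads (num_channels, input_size, z_shapes)
def calc_z_shapes (num_channels : Int) (input_size : Int) (num_flow : Int) (num_block : Int) : List (Int × Int × Int) :=
  let r := (PySem.List.pyRange 0 (num_block - 1) 1).foldl
    (fun (st : Int × Int × List (Int × Int × Int)) _ =>
      let input_size' := PySem.Int.floordiv st.2.1 2
      let num_channels' := st.1 * 2
      (num_channels', input_size', st.2.2 ++ [(num_channels', input_size', input_size')]))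
    (num_channels, input_size, [])
  let input_size' := PySem.Int.floordiv r.2.1 2
  r.2.2 ++ [(r.1 * 4, input_size', input_size')]

-- ===== PORT B =====
-- literal transliteration of B: each shape computed directly from its index.
-- Python's 'x << k' is exactly x * 2^k and 'x >> k' (arithmetic shift) is exactly
-- floor division x // 2^k for every Int x, so they are ported as *, floordiv by 2^k.
def calc_z_shapes_alt (num_channels : Int) (input_size : Int) (num_flow : Int) (num_block : Int) : List (Int × Int × Int) :=
  let n : Int := max 0 (num_block - 1)
  let shapes := (PySem.List.pyRange 0 n 1).map (fun i =>
    (num_channels * 2 ^ (i + 1).toNat,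
     PySem.Int.floordiv input_size (2 ^ (i + 1).toNat),
     PySem.Int.floordiv input_size (2 ^ (i + 1).toNat)))
  shapes ++ [(num_channels * 2 ^ n.toNat * 4,
              PySem.Int.floordiv input_size (2 ^ (n.toNat + 1)),
              PySem.Int.floordiv input_size (2 ^ (n.toNat + 1)))]

-- ===== PRECONDITION & SPEC =====
def Spec_calc_z_shapes (num_channels : Int) (input_size : Int) (num_flow : Int) (num_block : Int) (out : List (Int × Int × Int)) : Prop := out = calc_z_shapes_alt num_channels input_size num_flow num_block
instance (num_channels : Int) (input_size : Int) (num_flow : Int) (num_block : Int) (out : List (Int × Int × Int)) : Decidable (Spec_calc_z_shapes num_channels input_size num_flow num_block out) := by unfold Spec_calc_z_shapes; infer_instance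

-- ===== CLAIM (what is proved, stated in full; the proofs are below) =====
def Claim_equal_calc_z_shapes : Prop := ∀ (num_channels : Int) (input_size : Int) (num_flow : Int) (num_block : Int), Dom_calc_z_shapes num_channels input_size num_flow num_block → Spec_calc_z_shapes num_channels input_size num_flow num_block (calc_z_shapes num_channels input_size num_flow num_block)

-- ===== LEMMAS AND PROOFS =====

-- floor-dividing by 2 a result already floor-divided by 2^k is floor division by 2^(k+1)
theorem pv_fd_step (x : Int) (k : Nat) :
    PySem.Int.floordiv (PySem.Int.floordiv x (2 ^ k)) 2 = PySem.Int.floordiv x (2 ^ (k + 1)) := by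
  rw [PySem.Int.floordiv_eq_ediv_of_pos (a := x) (by positivity),
      PySem.Int.floordiv_eq_ediv_of_pos (by norm_num),
      PySem.Int.floordiv_eq_ediv_of_pos (by positivity),
      Int.ediv_ediv_of_nonneg (by positivity), pow_succ]

-- closed form of A's loop over range(k)
theorem pv_loopA (nc is : Int) (k : Nat) :
    (PySem.List.pyRange 0 (k : Int) 1).foldl
      (fun (st : Int × Int × List (Int × Int × Int)) _ =>
        let is' := PySem.Int.floordiv st.2.1 2
        let nc' := st.1 * 2
        (nc', is', st.2.2 ++ [(nc', is', is')]))
      (nc, is, [])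
    = (nc * 2 ^ k, PySem.Int.floordiv is (2 ^ k),
       (List.range k).map (fun i =>
         (nc * 2 ^ (i + 1), PySem.Int.floordiv is (2 ^ (i + 1)), PySem.Int.floordiv is (2 ^ (i + 1))))) := by
  induction k with
  | zero =>
      simp
  | succ k ih =>
      have h : (((k : Nat) + 1 : Nat) : Int) = (k : Int) + 1 := by push_cast; ring
      rw [h, PySem.List.pyRange_one_succ_right (by positivity), List.foldl_append, ih]
      simp only [List.foldl_cons, List.foldl_nil, List.range_succ, List.map_append, List.map_cons,
        List.map_nil]
      refine Prod.ext ?_ (Prod.ext ?_ ?_)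
      · simp [pow_succ]; ring
      · simp [pow_succ]; exact Int.ediv_ediv_of_nonneg (by positivity)
      · simp [pow_succ]
        exact ⟨by ring, Int.ediv_ediv_of_nonneg (by positivity)⟩

theorem calc_z_shapes_eq_alt (nc is nf nb : Int) :
    calc_z_shapes nc is nf nb = calc_z_shapes_alt nc is nf nb := by
  simp only [calc_z_shapes, calc_z_shapes_alt]
  by_cases h : nb - 1 ≤ 0
  · have h0 : max 0 (nb - 1) = 0 := by omega
    rw [PySem.List.pyRange_one_eq_nil h, h0]
    simp [pv_fd_step is 0]
  · obtain ⟨k, hk⟩ : ∃ k : Nat, nb - 1 = (k : Int) := ⟨(nb - 1).toNat, by omega⟩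
    have hm : max 0 (nb - 1) = (k : Int) := by omega
    rw [hm, hk, pv_loopA, PySem.List.pyRange_one]
    simp only [sub_zero, Int.toNat_natCast, List.map_map]
    refine congrArg₂ _ (List.map_congr_left ?_) ?_
    · intro i _
      simp only [Function.comp_apply, zero_add]
      have : ((i : Int) + 1).toNat = i + 1 := by omega
      rw [this]
    · rw [pv_fd_step]

-- ===== VERDICT (by name: the statement is the Claim_ definition above) =====
theorem calc_z_shapes_spec : Claim_equal_calc_z_shapes := by
  intro nc is nf nb _
  exact calc_z_shapes_eq_alt nc is nf nb
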